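-- pv_equiv track=rewrite | github.com/CzajaK-ZUT/Python---infor. | python202.py | get_combination_bellow
-- ===== SOURCE A (Python) =====
-- def get_all_combination(cities):
--     cities_name = [key for key in cities.keys()]
--     combinations = []
--
--     for i in range(len(cities_name)):
--         for j in range(i+1, len(cities_name)):
--             combinations.append((cities_name[i], cities_name[j]))
--
--     return combinations
--
-- def get_combination_bellow(cities, minimum=2):
--     city_combinations = get_all_combination(cities)
--     combination_bellow = []
--     for combination in city_combinations:
--         counter = 0
--
--         company1 = cities[combination[0]]
--         company2 = cities[combination[1]]
--
--         for company in company1: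
--             if company in company2:
--                 counter += 1
--
--         if counter < minimum:
--             combination_bellow.append(combination)
--
--     return combination_bellow
-- ===== SOURCE B (Python) =====
-- def get_combination_bellow(cities, minimum=2):
--     if minimum <= 0:
--         return []
--     items = list(cities.items())
--     result = []
--     while items:
--         name, comps = items.pop(0)
--         for other, ocomps in items:
--             if _shared_below(comps, ocomps, minimum):
--                 result.append((name, other))
--     return result
--
-- def _shared_below(comps, ocomps, minimum):
--     oset = set(ocomps)
--     c = 0
--     for x in comps:
--         if x in oset:
--             c += 1
--             if c >= minimum:
--                 return False
--     return True
-- ===== Notes on version B (the rewrite author's own statement) =====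
-- stated objective: alternative
-- what changed: Replaces A's two-pass scheme (materialise every (i,j) name pair, then re-look each name up in the dict and fully count shared companies) by a single structural sweep over the dict's items pairing each head city with the remaining ones, using a set of the other city's companies and an early-exit counter that stops as soon as 'minimum' shared companies are seen.
import Mathlib
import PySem

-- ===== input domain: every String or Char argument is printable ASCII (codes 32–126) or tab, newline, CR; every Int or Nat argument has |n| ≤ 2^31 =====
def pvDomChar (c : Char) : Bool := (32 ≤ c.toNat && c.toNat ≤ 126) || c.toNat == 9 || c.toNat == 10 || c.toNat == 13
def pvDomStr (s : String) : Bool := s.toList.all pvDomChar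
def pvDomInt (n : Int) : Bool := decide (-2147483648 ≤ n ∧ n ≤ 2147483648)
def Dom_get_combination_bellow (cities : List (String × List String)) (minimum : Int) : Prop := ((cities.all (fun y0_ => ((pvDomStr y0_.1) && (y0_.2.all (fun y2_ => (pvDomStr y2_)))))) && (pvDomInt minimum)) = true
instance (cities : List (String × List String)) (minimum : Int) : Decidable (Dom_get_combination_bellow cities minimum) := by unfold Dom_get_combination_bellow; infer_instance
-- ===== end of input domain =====

-- B replaces A's build-all-index-pairs-then-dict-lookup double pass by one structural sweep over the
-- dict's items (head paired against the rest) with early-exit shared-company counting; return values only.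

-- ===== PORT A =====
-- the dict argument is modelled as PySem.Dict.ofList cities (Python's dict(...): last value wins, first position kept)
def get_all_combination (cities : List (String × List String)) : List (String × String) :=
  let cities_name := (PySem.Dict.ofList cities).keys
  (PySem.List.pyRange 0 (PySem.List.len cities_name)).foldl (fun combinations i =>
    (PySem.List.pyRange (i + 1) (PySem.List.len cities_name)).foldl (fun combinations j =>
      combinations ++ [(PySem.List.pyGetD cities_name i "", PySem.List.pyGetD cities_name j "")])
      combinations) []

def get_combination_bellow (cities : List (String × List String)) (minimum : Int) : List (String × String) :=
  let d := PySem.Dict.ofList cities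
  let city_combinations := get_all_combination cities
  city_combinations.foldl (fun combination_bellow combination =>
    let company1 := d.getD combination.1 []
    let company2 := d.getD combination.2 []
    let counter : Int := company1.foldl (fun counter company =>
      if company ∈ company2 then counter + 1 else counter) 0
    if counter < minimum then combination_bellow ++ [combination] else combination_bellow) []

-- ===== PORT B =====
def pvSharedBelowAux (oset : PySem.Set String) (minimum : Int) : Int → List String → Bool
  | _, [] => true
  | c, x :: xs =>
      if x ∈ oset then
        (if c + 1 ≥ minimum then false else pvSharedBelowAux oset minimum (c + 1) xs)
      else pvSharedBelowAux oset minimum c xs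

def pvSharedBelow (comps ocomps : List String) (minimum : Int) : Bool :=
  pvSharedBelowAux (PySem.Set.ofList ocomps) minimum 0 comps

def pvGoB (minimum : Int) : List (String × String) → List (String × List String) → List (String × String)
  | result, [] => result
  | result, (name, comps) :: rest =>
      pvGoB minimum
        (rest.foldl (fun result p =>
          if pvSharedBelow comps p.2 minimum then result ++ [(name, p.1)] else result) result)
        rest

def get_combination_bellow_alt (cities : List (String × List String)) (minimum : Int) : List (String × String) :=
  if minimum ≤ 0 then []
  else pvGoB minimum [] (PySem.Dict.ofList cities).items

-- ===== PRECONDITION & SPEC =====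
def Spec_get_combination_bellow (cities : List (String × List String)) (minimum : Int) (out : List (String × String)) : Prop := out = get_combination_bellow_alt cities minimum
instance (cities : List (String × List String)) (minimum : Int) (out : List (String × String)) : Decidable (Spec_get_combination_bellow cities minimum out) := by unfold Spec_get_combination_bellow; infer_instance

-- ===== CLAIM (what is proved, stated in full; the proofs are below) =====
def Claim_equal_get_combination_bellow : Prop := ∀ (cities : List (String × List String)) (minimum : Int), Dom_get_combination_bellow cities minimum → Spec_get_combination_bellow cities minimum (get_combination_bellow cities minimum)

-- ===== LEMMAS AND PROOFS =====

-- the i<j pair list, structurally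
def pvPairs : List String → List (String × String)
  | [] => []
  | x :: xs => xs.map (fun o => (x, o)) ++ pvPairs xs

-- common midpoint: structural sweep with the full shared-company count
def pvM (m : Int) : List (String × List String) → List (String × String)
  | [] => []
  | (name, comps) :: rest =>
      (rest.filter (fun p => decide ((comps.countP (fun x => decide (x ∈ p.2)) : Int) < m))).map
        (fun p => (name, p.1)) ++ pvM m rest

lemma pv_flat_pairs (names : List String) :
    (List.range names.length).flatMap
      (fun i => (names.drop (i + 1)).map (fun o => (names.getD i "", o))) = pvPairs names := by
  induction names with
  | nil => simp [pvPairs]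
  | cons x xs ih =>
      simp only [List.length_cons]
      rw [List.range_succ_eq_map]
      simp only [List.flatMap_cons, List.flatMap_map, pvPairs]
      simp only [List.drop_succ_cons, List.getD_cons_succ, List.getD_cons_zero,
        List.drop_zero] at *
      rw [ih]

lemma pv_allcomb (cities : List (String × List String)) :
    get_all_combination cities = pvPairs (PySem.Dict.ofList cities).keys := by
  rw [← pv_flat_pairs]
  unfold get_all_combination
  simp only [PySem.List.foldl_append_singleton_eq_map]
  rw [PySem.List.foldl_append_eq_flatMap]
  simp only [List.nil_append, PySem.List.len_eq]
  rw [PySem.List.pyRange_zero_nat, List.flatMap_map]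
  congr 1
  funext i
  rw [show (fun j => (PySem.List.pyGetD (PySem.Dict.ofList cities).keys (↑i) "",
        PySem.List.pyGetD (PySem.Dict.ofList cities).keys j ""))
      = (fun o => (PySem.List.pyGetD (PySem.Dict.ofList cities).keys (↑i) "", o)) ∘
        (fun j => PySem.List.pyGetD (PySem.Dict.ofList cities).keys j "") from rfl]
  rw [← List.map_map]
  rw [PySem.List.map_pyGetD_pyRange' (PySem.Dict.ofList cities).keys "" (show (0:Int) ≤ ↑i + 1 by omega)]
  rw [show ((i : Int) + 1).toNat = i + 1 from by omega]
  rw [PySem.List.pyGetD_natCast]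

lemma pv_A_side (l : List (String × List String)) (d : PySem.Dict String (List String)) (m : Int)
    (hnd : d.keys.Nodup) (hsub : ∀ p ∈ l, p ∈ d.items) :
    (pvPairs (l.map (·.1))).filter
      (fun pr => decide (((d.getD pr.1 []).countP (fun x => decide (x ∈ d.getD pr.2 [])) : Int) < m))
      = pvM m l := by
  induction l with
  | nil => simp [pvPairs, pvM]
  | cons hd rest ih =>
      obtain ⟨name, comps⟩ := hd
      simp only [List.map_cons, pvPairs, pvM, List.filter_append, List.filter_map]
      have hhd : d.getD name [] = comps :=
        PySem.Dict.getD_of_mem_items d (hsub _ (by simp)) hnd []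
      congr 1
      · rw [List.map_map]
        refine (congrArg _ (List.filter_congr fun p hp => ?_)).trans rfl
        have hp2 : d.getD p.1 [] = p.2 :=
          PySem.Dict.getD_of_mem_items d (k := p.1) (v := p.2)
            (by simpa using hsub p (List.mem_cons_of_mem _ hp)) hnd []
        simp only [Function.comp_apply]
        rw [hhd, hp2]
      · exact ih (fun p hp => hsub p (by simp [hp]))

lemma pv_aux_count (oset : PySem.Set String) (m : Int) :
    ∀ (xs : List String) (c : Int), c < m →
      pvSharedBelowAux oset m c xs = decide (c + (xs.countP (fun x => decide (x ∈ oset)) : Int) < m) := by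
  intro xs
  induction xs with
  | nil => intro c hc; simp [pvSharedBelowAux, hc]
  | cons x xs ih =>
      intro c hc
      have h0 : (0:Int) ≤ (xs.countP (fun x => decide (x ∈ oset)) : Int) := Int.natCast_nonneg _
      by_cases hx : x ∈ oset
      · rw [show pvSharedBelowAux oset m c (x :: xs)
            = if c + 1 ≥ m then false else pvSharedBelowAux oset m (c + 1) xs from by
              simp [pvSharedBelowAux, hx]]
        by_cases hge : c + 1 ≥ m
        · rw [if_pos hge]
          symm
          rw [decide_eq_false_iff_not]
          simp only [List.countP_cons, hx, decide_true, if_pos]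
          push_cast
          omega
        · rw [if_neg hge, ih (c + 1) (by omega)]
          rw [decide_eq_decide]
          simp only [List.countP_cons, hx, decide_true, if_pos]
          push_cast
          omega
      · rw [show pvSharedBelowAux oset m c (x :: xs) = pvSharedBelowAux oset m c xs from by
            simp [pvSharedBelowAux, hx]]
        rw [ih c hc]
        simp [hx]

lemma pv_B_side (m : Int) (hm : 0 < m) :
    ∀ (l : List (String × List String)) (acc : List (String × String)),
      pvGoB m acc l = acc ++ pvM m l := by
  intro l
  induction l with
  | nil => intro acc; simp [pvGoB, pvM]
  | cons hd rest ih =>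
      intro acc
      obtain ⟨name, comps⟩ := hd
      simp only [pvGoB, pvM]
      rw [PySem.List.foldl_append_if (fun p : String × List String => pvSharedBelow comps p.2 m)
        (fun p : String × List String => (name, p.1))]
      rw [ih, List.append_assoc]
      congr 3
      apply List.filter_congr
      intro p _
      rw [pvSharedBelow, pv_aux_count _ _ _ 0 hm]
      simp only [zero_add]
      congr 1
      rw [List.countP_congr]
      intro x _
      simp [PySem.Set.mem_ofList]

lemma pv_M_nonpos (m : Int) (hm : m ≤ 0) :
    ∀ l : List (String × List String), pvM m l = [] := by
  intro l
  induction l with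
  | nil => rfl
  | cons hd rest ih =>
      obtain ⟨name, comps⟩ := hd
      simp only [pvM, ih, List.append_nil]
      rw [List.filter_eq_nil_iff.mpr, List.map_nil]
      intro p _
      simp only [decide_eq_true_eq, not_lt]
      calc m ≤ 0 := hm
        _ ≤ _ := Int.natCast_nonneg _

lemma pv_counter (c2 c1 : List String) :
    (c1.foldl (fun counter company => if company ∈ c2 then counter + 1 else counter) (0:Int))
      = (c1.countP (fun x => decide (x ∈ c2)) : Int) := by
  have h := PySem.List.foldl_count_if (fun x : String => decide (x ∈ c2)) c1 0
  simpa using h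

-- ===== VERDICT (by name: the statement is the Claim_ definition above) =====
theorem get_combination_bellow_spec : Claim_equal_get_combination_bellow := by
  intro cities minimum _
  unfold Spec_get_combination_bellow get_combination_bellow get_combination_bellow_alt
  dsimp only
  rw [pv_allcomb]
  have hfi := PySem.List.foldl_append_if
      (fun pr : String × String => decide ((((PySem.Dict.ofList cities).getD pr.1 []).foldl
        (fun counter company => if company ∈ (PySem.Dict.ofList cities).getD pr.2 []
          then counter + 1 else counter) (0:Int)) < minimum))
      (fun pr : String × String => pr)
      (pvPairs (PySem.Dict.ofList cities).keys) []
  simp only [decide_eq_true_eq, List.map_id', List.nil_append] at hfi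
  rw [hfi]
  simp only [pv_counter]
  rw [show (PySem.Dict.ofList cities).keys
      = (PySem.Dict.ofList cities).items.map (fun x => x.1) from rfl]
  rw [pv_A_side (PySem.Dict.ofList cities).items (PySem.Dict.ofList cities) minimum
    (PySem.Dict.nodup_keys_ofList cities) (fun p hp => hp)]
  by_cases hm : minimum ≤ 0
  · rw [if_pos hm, pv_M_nonpos minimum hm]
  · rw [if_neg hm, pv_B_side minimum (by omega) _ [], List.nil_append]
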